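-- pv_equiv track=rewrite | github.com/DanielElisenberg/advent-of-code | 2018/python/day06/day06.py | find_areas
-- ===== SOURCE A (Python) =====
-- from collections import defaultdict
--
-- def find_closest_coordinate(point, coordinates):
--     coordinate_distances = {}
--
--     for coordinate in coordinates:
--         distance = (abs(coordinate[0] - point[0]), abs(coordinate[1] - point[1]))
--         manhattan_distance = distance[0] + distance[1]
--         coordinate_distances[coordinate] = manhattan_distance
--
--     closest_coordinates = [
--         k
--         for k, v in coordinate_distances.items()
--         if v == min([v for k, v in coordinate_distances.items()])
--     ]
--     if len(closest_coordinates) > 1: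
--         raise RuntimeError("Two points are equally close!")
--     else:
--         return closest_coordinates[0]
--
-- def find_areas(coordinates, plane_size):
--     areas = defaultdict(int)
--     for y in plane_size:
--         for x in plane_size:
--             try:
--                 closest_point = find_closest_coordinate((x, y), coordinates)
--             except RuntimeError:
--                 continue
--             areas[closest_point] += 1
--     return areas
-- ===== SOURCE B (Python) =====
-- def find_areas(coordinates, plane_size):
--     coords = list(dict.fromkeys(coordinates))
--     areas = {}
--     for y in plane_size:
--         for x in plane_size:
--             best = None
--             best_distance = 0
--             ties = 0
--             for cx, cy in coords:
--                 d = abs(cx - x) + abs(cy - y)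
--                 if best is None or d < best_distance:
--                     best, best_distance, ties = (cx, cy), d, 1
--                 elif d == best_distance:
--                     ties += 1
--             if best is not None and ties == 1:
--                 areas[best] = areas.get(best, 0) + 1
--     return areas
-- ===== Notes on version B (the rewrite author's own statement) =====
-- stated objective: faster
-- what changed: Per grid cell, A builds a dict of all coordinate distances and filters it with a comprehension that recomputes min over all values for every entry (quadratic in the number of coordinates); B deduplicates the coordinates once and does a single pass per cell tracking best coordinate, best distance and a tie count, never building the distance dict.
import Mathlib
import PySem

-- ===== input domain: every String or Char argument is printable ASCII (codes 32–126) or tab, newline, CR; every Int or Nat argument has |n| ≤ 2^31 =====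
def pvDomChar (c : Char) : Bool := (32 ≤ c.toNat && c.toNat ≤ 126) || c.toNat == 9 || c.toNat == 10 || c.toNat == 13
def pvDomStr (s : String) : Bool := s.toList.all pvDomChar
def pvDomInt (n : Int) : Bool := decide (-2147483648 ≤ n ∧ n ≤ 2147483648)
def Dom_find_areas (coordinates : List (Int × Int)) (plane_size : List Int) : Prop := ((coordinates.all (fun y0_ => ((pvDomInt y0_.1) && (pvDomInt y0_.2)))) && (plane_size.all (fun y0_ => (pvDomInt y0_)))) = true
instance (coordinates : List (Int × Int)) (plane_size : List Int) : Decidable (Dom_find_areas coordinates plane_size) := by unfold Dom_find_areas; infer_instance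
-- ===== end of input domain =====

-- B replaces A's per-cell dict of distances (whose min is recomputed inside the filtering
-- comprehension for every coordinate) by one single pass over the deduplicated coordinates
-- tracking (best, best_distance, ties); same return value, proved below.

-- ===== PORT A =====
-- A raises RuntimeError on a tie (caught by the caller) and IndexError on closest_coordinates[0]
-- when coordinates is empty (NOT caught): both exits are `none` here; the uncaught IndexError
-- case is excluded by Pre_find_areas.
def find_closest_coordinate (point : Int × Int) (coordinates : List (Int × Int)) :
    Option (Int × Int) :=
  let cd : PySem.Dict (Int × Int) Int :=
    coordinates.foldl (fun d coordinate =>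
      let distance := (|coordinate.1 - point.1|, |coordinate.2 - point.2|)
      d.insert coordinate (distance.1 + distance.2)) PySem.Dict.empty
  let closest := (cd.items.filter (fun p =>
      decide (PySem.List.min? (cd.items.map (·.2)) (fun v => v) = some p.2))).map (·.1)
  if 1 < closest.length then none
  else PySem.List.pyGet? closest 0

def find_areas (coordinates : List (Int × Int)) (plane_size : List Int) : List (Int × Int × Int) :=
  let areas : PySem.Dict (Int × Int) Int :=
    plane_size.foldl (fun areas y =>
      plane_size.foldl (fun areas x =>
        match find_closest_coordinate (x, y) coordinates with
        | none => areas
        | some c => areas.modify c 0 (· + 1)) areas) PySem.Dict.empty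
  areas.items.map (fun p => (p.1.1, p.1.2, p.2))

-- ===== PORT B =====
def pvDist (point c : Int × Int) : Int := |c.1 - point.1| + |c.2 - point.2|

-- body of B's inner `for cx, cy in coords` loop
def pvStepB (point : Int × Int) (acc : Option ((Int × Int) × Int × Int)) (c : Int × Int) :
    Option ((Int × Int) × Int × Int) :=
  let d := pvDist point c
  match acc with
  | none => some (c, d, (1 : Int))
  | some (bc, bd, ties) =>
    if d < bd then some (c, d, 1)
    else if d = bd then some (bc, bd, ties + 1)
    else some (bc, bd, ties)

-- the per-cell scan: `none` state = `best is None`; afterwards keep best only if ties == 1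
def pvClosestUnique (point : Int × Int) (coords : List (Int × Int)) : Option (Int × Int) :=
  match coords.foldl (pvStepB point) none with
  | some (bc, _, ties) => if ties = 1 then some bc else none
  | none => none

def find_areas_alt (coordinates : List (Int × Int)) (plane_size : List Int) : List (Int × Int × Int) :=
  let coords := PySem.List.dedup coordinates
  let areas : PySem.Dict (Int × Int) Int :=
    plane_size.foldl (fun areas y =>
      plane_size.foldl (fun areas x =>
        match pvClosestUnique (x, y) coords with
        | none => areas
        | some c => areas.insert c (areas.getD c 0 + 1)) areas) PySem.Dict.empty
  areas.items.map (fun p => (p.1.1, p.1.2, p.2))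

-- ===== PRECONDITION & SPEC =====
-- Pre_ excludes only the inputs where Python A raises: with an empty coordinate list and a
-- non-empty plane, `closest_coordinates[0]` raises an uncaught IndexError.
def Pre_find_areas (coordinates : List (Int × Int)) (plane_size : List Int) : Prop :=
  coordinates ≠ [] ∨ plane_size = []
instance (coordinates : List (Int × Int)) (plane_size : List Int) :
    Decidable (Pre_find_areas coordinates plane_size) := by unfold Pre_find_areas; infer_instance

def pvWitness_find_areas : (List (Int × Int)) × List Int := ([(0, 0), (3, 0)], [0, 1, 2])

def Spec_find_areas (coordinates : List (Int × Int)) (plane_size : List Int)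
    (out : List (Int × Int × Int)) : Prop := out = find_areas_alt coordinates plane_size
instance (coordinates : List (Int × Int)) (plane_size : List Int) (out : List (Int × Int × Int)) :
    Decidable (Spec_find_areas coordinates plane_size out) := by unfold Spec_find_areas; infer_instance

-- ===== CLAIM (what is proved, stated in full; the proofs are below) =====
def Claim_equal_find_areas : Prop := ∀ (coordinates : List (Int × Int)) (plane_size : List Int), Dom_find_areas coordinates plane_size → Pre_find_areas coordinates plane_size → Spec_find_areas coordinates plane_size (find_areas coordinates plane_size)

-- ===== LEMMAS AND PROOFS =====
theorem pv_build_items (point : Int × Int) :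
    ∀ (coords l : List (Int × Int)), l.Nodup →
    (coords.foldl (fun d coordinate =>
        let distance := (|coordinate.1 - point.1|, |coordinate.2 - point.2|)
        d.insert coordinate (distance.1 + distance.2))
      (PySem.Dict.mk (l.map (fun c => (c, pvDist point c))))).items
    = (PySem.Set.update l coords).map (fun c => (c, pvDist point c)) := by
  intro coords
  induction coords with
  | nil => intro l h; simp [PySem.Set.update]
  | cons c cs ih =>
    intro l hnd
    simp only [List.foldl_cons]
    rw [PySem.Set.update_cons]
    have hstep : (PySem.Dict.mk (l.map (fun c => (c, pvDist point c)))).insert c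
        (|c.1 - point.1| + |c.2 - point.2|)
        = PySem.Dict.mk ((PySem.Set.add l c).map (fun c => (c, pvDist point c))) := by
      apply PySem.Dict.ext
      by_cases hc : c ∈ l
      · rw [PySem.Set.add_of_mem hc]
        rw [PySem.Dict.items_insert_of_contains]
        · show (l.map (fun c => (c, pvDist point c))).map _ = _
          rw [List.map_map]
          apply List.map_congr_left
          intro a ha
          by_cases hac : a = c
          · subst hac; simp [pvDist]
          · simp [Function.comp, hac]
        · simp [hc]
      · rw [PySem.Set.add_of_not_mem hc]
        rw [PySem.Dict.items_insert_of_not_contains]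
        · show l.map (fun c => (c, pvDist point c)) ++ _ = _
          simp [pvDist]
        · simp only [PySem.Dict.contains_mk]
          simp
          intro a b hab hebc; exact hc (hebc ▸ hab)
    rw [hstep]
    exact ih (PySem.Set.add l c) (PySem.Set.nodup_add l c hnd)


theorem pv_fold_spec (point : Int × Int) :
    ∀ (l : List (Int × Int)), l ≠ [] →
    ∃ bc m, l.foldl (pvStepB point) none
        = some (bc, m, (l.countP (fun c => decide (pvDist point c = m)) : Int))
      ∧ (∀ c ∈ l, m ≤ pvDist point c)
      ∧ (l.filter (fun c => decide (pvDist point c = m))).head? = some bc := by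
  intro l
  induction l using List.reverseRecOn with
  | nil => intro h; exact absurd rfl h
  | append_singleton t c ih =>
    intro _
    rcases eq_or_ne t [] with rfl | ht
    · refine ⟨c, pvDist point c, ?_, ?_, ?_⟩
      · simp [pvStepB, pvDist]
      · intro a ha; simp at ha; subst ha; exact le_refl _
      · simp
    · obtain ⟨bc, m, hfold, hlb, hhead⟩ := ih ht
      rw [List.foldl_append, hfold]
      rcases lt_trichotomy (pvDist point c) m with hlt | heq | hgt
      · refine ⟨c, pvDist point c, ?_, ?_, ?_⟩
        · rw [List.foldl_cons, List.foldl_nil]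
          simp only [pvStepB]
          rw [if_pos hlt]
          have hz : t.countP (fun a => decide (pvDist point a = pvDist point c)) = 0 := by
            rw [List.countP_eq_zero]
            intro a ha hq
            simp at hq
            exact absurd (hq ▸ hlb a ha) (not_le.mpr hlt)
          rw [List.countP_append, hz]
          simp
        · intro a ha
          rcases List.mem_append.mp ha with h | h
          · exact le_trans (le_of_lt hlt) (hlb a h)
          · simp at h; subst h; exact le_refl _
        · rw [List.filter_append]
          have hz : t.filter (fun a => decide (pvDist point a = pvDist point c)) = [] := by
            rw [List.filter_eq_nil_iff]
            intro a ha hq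
            simp at hq
            exact absurd (hq ▸ hlb a ha) (not_le.mpr hlt)
          simp [hz]
      · refine ⟨bc, m, ?_, ?_, ?_⟩
        · rw [List.foldl_cons, List.foldl_nil]
          simp only [pvStepB]
          rw [if_neg (by rw [heq]; exact lt_irrefl m), if_pos heq]
          rw [List.countP_append]
          simp [heq]
        · intro a ha
          rcases List.mem_append.mp ha with h | h
          · exact hlb a h
          · simp at h; subst h; exact le_of_eq heq.symm
        · rw [List.filter_append, List.head?_append, hhead]
          rfl
      · refine ⟨bc, m, ?_, ?_, ?_⟩
        · rw [List.foldl_cons, List.foldl_nil]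
          simp only [pvStepB]
          rw [if_neg (not_lt.mpr (le_of_lt hgt)), if_neg (by exact fun h => absurd (h ▸ hgt) (lt_irrefl _))]
          rw [List.countP_append]
          have hz : List.countP (fun c => decide (pvDist point c = m)) [c] = 0 := by
            simp [pvDist]
            exact fun h => absurd (h ▸ hgt) (lt_irrefl _)
          rw [hz]
          simp
        · intro a ha
          rcases List.mem_append.mp ha with h | h
          · exact hlb a h
          · simp at h; subst h; exact le_of_lt hgt
        · rw [List.filter_append, List.head?_append, hhead]
          rfl



theorem pv_closest_eq (point : Int × Int) (coords : List (Int × Int)) :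
    find_closest_coordinate point coords = pvClosestUnique point (PySem.Set.ofList coords) := by
  have hitems : (coords.foldl (fun d coordinate =>
      let distance := (|coordinate.1 - point.1|, |coordinate.2 - point.2|)
      d.insert coordinate (distance.1 + distance.2)) PySem.Dict.empty).items
      = (PySem.Set.ofList coords).map (fun c => (c, pvDist point c)) := by
    have h := pv_build_items point coords [] List.nodup_nil
    simpa [PySem.Set.update_nil_left] using h
  unfold find_closest_coordinate pvClosestUnique
  simp only [hitems]
  by_cases hnil : PySem.Set.ofList coords = []
  · simp [hnil, PySem.List.pyGet?]
  · obtain ⟨bc, m, hfold, hlb, hhead⟩ := pv_fold_spec point _ hnil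
    rw [hfold]
    -- bc is in the filtered list
    have hbcmem : bc ∈ (PySem.Set.ofList coords).filter (fun c => decide (pvDist point c = m)) := by
      exact List.mem_of_mem_head? (by rw [hhead]; simp)
    have hbc : bc ∈ PySem.Set.ofList coords ∧ pvDist point bc = m := by
      have := List.mem_filter.mp hbcmem
      simpa using this
    -- the minimum of the value list is m
    have hmin : PySem.List.min? (((PySem.Set.ofList coords).map
        (fun c => (c, pvDist point c))).map (·.2)) (fun v => v) = some m := by
      rw [List.map_map]
      have hne : (PySem.Set.ofList coords).map ((·.2) ∘ (fun c => (c, pvDist point c))) ≠ [] := by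
        simpa using hnil
      rcases hm' : PySem.List.min? ((PySem.Set.ofList coords).map
          ((·.2) ∘ (fun c => (c, pvDist point c)))) (fun v => v) with _ | m'
      · exact absurd ((PySem.List.min?_eq_none_iff _ _).mp hm') hne
      · have hmem := PySem.List.min?_mem hm'
        have hisMin := PySem.List.min?_isMin hm'
        obtain ⟨c, hc, hcv⟩ := List.mem_map.mp hmem
        have hcv' : pvDist point c = m' := by simpa using hcv
        have h1 : m ≤ m' := hcv' ▸ hlb c hc
        have h2 : m' ≤ m := by
          simpa using hisMin _ (List.mem_map.mpr ⟨bc, hbc.1, by simpa using hbc.2⟩)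
        rw [hm']
        exact congrArg some (le_antisymm h2 h1)
    simp only [hmin]
    -- the closest list is the filtered dedup list
    have hclosest : ((((PySem.Set.ofList coords).map (fun c => (c, pvDist point c))).filter
          (fun p => decide (some m = some p.2))).map (·.1))
        = (PySem.Set.ofList coords).filter (fun c => decide (pvDist point c = m)) := by
      rw [List.filter_map]
      rw [List.filter_congr (l := PySem.Set.ofList coords)
        (q := fun c => decide (pvDist point c = m))
        (by intro c hc; simp [Function.comp, eq_comm])]
      have hid : ((fun x : (Int × Int) × Int => x.1) ∘ fun c : Int × Int => (c, pvDist point c)) = id := rfl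
      rw [List.map_map, hid, List.map_id]
    rw [hclosest]
    have hlen : ((PySem.Set.ofList coords).filter (fun c => decide (pvDist point c = m))).length
        = (PySem.Set.ofList coords).countP (fun c => decide (pvDist point c = m)) := by
      exact List.countP_eq_length_filter.symm
    by_cases hone : (PySem.Set.ofList coords).countP (fun c => decide (pvDist point c = m)) = 1
    · obtain ⟨tl, htl⟩ := List.head?_eq_some_iff.mp hhead
      have : tl = [] := by
        have := hlen
        rw [htl, hone] at this
        simpa using this
      rw [htl, this]
      simp [PySem.List.pyGet?, PySem.List.pyIdx?, hone]
    · have h2 : 1 < (PySem.Set.ofList coords).countP (fun c => decide (pvDist point c = m)) := by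
        have h1 : 1 ≤ (PySem.Set.ofList coords).countP (fun c => decide (pvDist point c = m)) := by
          rw [← hlen]
          exact List.length_pos_of_mem hbcmem
        omega
      rw [hlen]
      rw [if_pos h2]
      have : ((PySem.Set.ofList coords).countP (fun c => decide (pvDist point c = m)) : Int) ≠ 1 := by
        exact_mod_cast hone
      simp [this]

theorem pv_find_areas_eq (coordinates : List (Int × Int)) (plane_size : List Int) :
    find_areas coordinates plane_size = find_areas_alt coordinates plane_size := by
  unfold find_areas find_areas_alt
  have hfun : (fun (areas : PySem.Dict (Int × Int) Int) (y : Int) =>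
      plane_size.foldl (fun areas x =>
        match find_closest_coordinate (x, y) coordinates with
        | none => areas
        | some c => areas.modify c 0 (· + 1)) areas)
      = (fun (areas : PySem.Dict (Int × Int) Int) (y : Int) =>
      plane_size.foldl (fun areas x =>
        match pvClosestUnique (x, y) (PySem.List.dedup coordinates) with
        | none => areas
        | some c => areas.insert c (areas.getD c 0 + 1)) areas) := by
    funext areas y
    congr 1
    funext areas x
    rw [PySem.List.dedup_eq_ofList, pv_closest_eq]
    cases pvClosestUnique (x, y) (PySem.Set.ofList coordinates) with
    | none => rfl
    | some c => rfl
  rw [hfun]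

-- ===== VERDICT (by name: the statement is the Claim_ definition above) =====
theorem find_areas_spec : Claim_equal_find_areas := by
  intro coordinates plane_size _ _
  unfold Spec_find_areas
  exact pv_find_areas_eq coordinates plane_size
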